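-- pv_equiv track=rewrite | github.com/GeorgeKonrad29/Multiplexor_Redux | PROYECTO 2 ELECTRONICA DIGITAL/BACK/back.py | convert_number_binary
-- ===== SOURCE A (Python) =====
-- def convert_number_binary(mntrms):
--     mx_mntrm = max(mntrms) if mntrms else 0
--     n_bts = mx_mntrm.bit_length() if mx_mntrm > 0 else 1
--     b_dic = {}
--     for i in range(2 ** n_bts):
--         b_l = [int(bt) for bt in format(i, f'0{n_bts}b')]
--         b_dic[i] = b_l
--     return b_dic
-- ===== SOURCE B (Python) =====
-- def convert_number_binary(mntrms):
--     mx_mntrm = max(mntrms) if mntrms else 0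
--     n_bts = mx_mntrm.bit_length() if mx_mntrm > 0 else 1
--     rows = [[]]
--     for _ in range(n_bts):
--         rows = [[0] + r for r in rows] + [[1] + r for r in rows]
--     return dict(enumerate(rows))
-- ===== Notes on version B (the rewrite author's own statement) =====
-- stated objective: faster
-- what changed: Instead of looping over every integer in range(2**n_bts) and string-formatting each one into a padded binary string, B builds the whole table by prefix doubling over bit positions (rows = [[0]+r ...] + [[1]+r ...] repeated n_bts times, which yields the bit-lists already in ascending numeric order) and returns dict(enumerate(rows)).
import Mathlib
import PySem

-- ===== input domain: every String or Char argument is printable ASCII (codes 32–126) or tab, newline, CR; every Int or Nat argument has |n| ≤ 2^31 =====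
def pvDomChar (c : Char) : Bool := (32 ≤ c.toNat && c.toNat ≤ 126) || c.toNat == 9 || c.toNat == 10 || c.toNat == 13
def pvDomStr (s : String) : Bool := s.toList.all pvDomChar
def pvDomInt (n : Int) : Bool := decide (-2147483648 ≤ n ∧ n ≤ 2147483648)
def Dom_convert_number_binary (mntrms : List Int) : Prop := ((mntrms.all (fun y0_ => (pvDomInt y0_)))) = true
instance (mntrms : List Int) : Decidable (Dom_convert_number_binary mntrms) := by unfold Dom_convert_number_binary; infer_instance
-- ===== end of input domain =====

-- B replaces the per-integer binary formatting loop by prefix doubling over bit positions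
-- (rows = [[0]+r …] + [[1]+r …] repeated n_bts times); same return value, different decomposition.

-- ===== PORT A =====
-- int(bt) on a single digit character; exact on the '0'/'1' characters format(i, '0{n}b') yields for i ≥ 0
def pvDigitVal (c : Char) : Int := (c.toNat : Int) - 48

def convert_number_binary (mntrms : List Int) : List (Int × List Int) :=
  -- mx_mntrm = max(mntrms) if mntrms else 0
  let mx_mntrm : Int :=
    match PySem.List.max? mntrms (fun x => x) with
    | some m => m
    | none => 0
  -- n_bts = mx_mntrm.bit_length() if mx_mntrm > 0 else 1
  let n_bts : Nat := if 0 < mx_mntrm then PySem.Int.bitLength mx_mntrm else 1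
  -- for i in range(2 ** n_bts): b_dic[i] = [int(bt) for bt in format(i, f'0{n_bts}b')]
  -- format(i, f'0{n_bts}b') for i ≥ 0 is format(i, 'b') (= PySem.Int.toBinChars) zero-filled to width n_bts
  let b_dic : PySem.Dict Int (List Int) :=
    (PySem.List.pyRange 0 ((2 : Int) ^ n_bts) 1).foldl
      (fun d i => d.insert i ((PySem.Chars.zfill (PySem.Int.toBinChars i) (n_bts : Int)).map pvDigitVal))
      PySem.Dict.empty
  b_dic.items

-- ===== PORT B =====
def convert_number_binary_alt (mntrms : List Int) : List (Int × List Int) :=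
  -- mx_mntrm = max(mntrms) if mntrms else 0
  let mx_mntrm : Int :=
    match PySem.List.max? mntrms (fun x => x) with
    | some m => m
    | none => 0
  -- n_bts = mx_mntrm.bit_length() if mx_mntrm > 0 else 1
  let n_bts : Nat := if 0 < mx_mntrm then PySem.Int.bitLength mx_mntrm else 1
  -- rows = [[]]; for _ in range(n_bts): rows = [[0] + r for r in rows] + [[1] + r for r in rows]
  let rows : List (List Int) :=
    (List.range n_bts).foldl
      (fun rs _ => rs.map (fun r => (0 : Int) :: r) ++ rs.map (fun r => (1 : Int) :: r)) [[]]
  -- return dict(enumerate(rows))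
  (PySem.Dict.ofList (PySem.List.enumerate rows 0)).items

-- ===== PRECONDITION & SPEC =====
def Spec_convert_number_binary (mntrms : List Int) (out : List (Int × List Int)) : Prop := out = convert_number_binary_alt mntrms
instance (mntrms : List Int) (out : List (Int × List Int)) : Decidable (Spec_convert_number_binary mntrms out) := by unfold Spec_convert_number_binary; infer_instance

-- ===== CLAIM (what is proved, stated in full; the proofs are below) =====
def Claim_equal_convert_number_binary : Prop := ∀ (mntrms : List Int), Dom_convert_number_binary mntrms → Spec_convert_number_binary mntrms (convert_number_binary mntrms)

-- ===== LEMMAS AND PROOFS =====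

-- the binary digit characters of n, msb first (what Nat.toDigits 2 computes)
def binChars (n : Nat) : List Char :=
  if h : n < 2 then [Nat.digitChar n] else binChars (n / 2) ++ [Nat.digitChar (n % 2)]
decreasing_by exact Nat.div_lt_self (by omega) (by omega)

-- the low n bits of i, msb first, as Ints
def fbits : Nat → Nat → List Int
  | 0, _ => []
  | n + 1, i => fbits n (i / 2) ++ [((i % 2 : Nat) : Int)]

theorem toDigitsCore_two_eq : ∀ (f n : Nat) (acc : List Char), 0 < f → n < 2 ^ f →
    Nat.toDigitsCore 2 f n acc = binChars n ++ acc := by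
  intro f
  induction f with
  | zero => intro n acc h _; omega
  | succ f ih =>
    intro n acc _ hn
    rw [Nat.toDigitsCore]
    by_cases h2 : n < 2
    · have hd : n / 2 = 0 := Nat.div_eq_of_lt h2
      simp [hd, binChars, h2, Nat.mod_eq_of_lt h2]
    · have hd : ¬ (n / 2 = 0) := by omega
      have hf : 0 < f := by
        by_contra h; push_neg at h
        interval_cases f
        simp at hn; omega
      have hlt : n / 2 < 2 ^ f := by rw [pow_succ] at hn; omega
      simp only [hd, if_false]
      rw [ih _ _ hf hlt]
      conv_rhs => rw [binChars]
      simp [h2]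

theorem toDigits_two_eq (n : Nat) : Nat.toDigits 2 n = binChars n := by
  have hlt : n < 2 ^ (n + 1) :=
    lt_of_lt_of_le Nat.lt_two_pow_self (Nat.pow_le_pow_right (by omega) (by omega))
  have := toDigitsCore_two_eq (n + 1) n [] (by omega) hlt
  simpa [Nat.toDigits] using this

theorem pvDigitVal_digitChar (d : Nat) (h : d < 2) : pvDigitVal (Nat.digitChar d) = (d : Int) := by
  interval_cases d <;> decide

theorem binChars_head (n : Nat) : ∃ c rest, binChars n = c :: rest ∧ ¬(c = '+' ∨ c = '-') := by
  induction n using Nat.strong_induction_on with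
  | _ n ih =>
    rw [binChars]
    by_cases h : n < 2
    · refine ⟨Nat.digitChar n, [], by simp [h], ?_⟩
      interval_cases n <;> decide
    · obtain ⟨c, rest, hc, hne⟩ := ih (n / 2) (Nat.div_lt_self (by omega) (by omega))
      exact ⟨c, rest ++ [Nat.digitChar (n % 2)], by simp [h, hc], hne⟩

theorem zfill_no_sign (c : Char) (rest : List Char) (h : ¬(c = '+' ∨ c = '-')) (w : Int) :
    PySem.Chars.zfill (c :: rest) w =
      List.replicate (w.toNat - (c :: rest).length) '0' ++ (c :: rest) := by
  rw [PySem.Chars.zfill]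
  simp only [List.length_cons]
  by_cases hw : w ≤ ((rest.length : Int) + 1)
  · have h0 : w.toNat - (rest.length + 1) = 0 := by omega
    simp [hw, h0]
  · simp [hw, h]

theorem fbits_zero (n : Nat) : fbits n 0 = List.replicate n (0 : Int) := by
  induction n with
  | zero => simp [fbits]
  | succ n ih => rw [fbits]; simp [ih, ← List.replicate_succ']

theorem pad_fbits : ∀ n, 1 ≤ n → ∀ i, i < 2 ^ n →
    List.replicate (n - (binChars i).length) (0 : Int) ++ (binChars i).map pvDigitVal
      = fbits n i := by
  intro n hn
  induction n, hn using Nat.le_induction with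
  | base =>
    intro i hi
    have h2 : i < 2 := by simpa using hi
    rw [binChars]
    simp [h2, fbits, Nat.mod_eq_of_lt h2, Nat.div_eq_of_lt h2, fbits_zero,
      pvDigitVal_digitChar i h2]
  | succ n hn ih =>
    intro i hi
    rw [binChars]
    by_cases h2 : i < 2
    · have hd : i / 2 = 0 := Nat.div_eq_of_lt h2
      have hm : i % 2 = i := Nat.mod_eq_of_lt h2
      simp [h2, fbits, hd, hm, fbits_zero, pvDigitVal_digitChar i h2, ← List.replicate_succ']
    · have hlt : i / 2 < 2 ^ n := by rw [pow_succ] at hi; omega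
      rw [dif_neg h2, List.length_append, List.map_append]
      simp only [List.length_singleton, List.map_singleton]
      have hlen : n + 1 - ((binChars (i / 2)).length + 1) = n - (binChars (i / 2)).length := by
        omega
      rw [hlen, ← List.append_assoc, ih (i / 2) hlt,
        pvDigitVal_digitChar (i % 2) (Nat.mod_lt _ (by omega))]
      rfl

theorem fbits_low : ∀ n i, i < 2 ^ n → fbits (n + 1) i = 0 :: fbits n i := by
  intro n
  induction n with
  | zero =>
    intro i hi
    have : i = 0 := by simpa using hi
    subst this; simp [fbits]
  | succ n ih =>
    intro i hi
    have hlt : i / 2 < 2 ^ n := by rw [pow_succ] at hi; omega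
    rw [fbits, ih (i / 2) hlt]
    rw [show fbits (n + 1) i = fbits n (i / 2) ++ [((i % 2 : Nat) : Int)] from rfl]
    simp

theorem fbits_high : ∀ n i, i < 2 ^ n → fbits (n + 1) (2 ^ n + i) = 1 :: fbits n i := by
  intro n
  induction n with
  | zero =>
    intro i hi
    have : i = 0 := by simpa using hi
    subst this; simp [fbits]
  | succ n ih =>
    intro i hi
    have hlt : i / 2 < 2 ^ n := by rw [pow_succ] at hi; omega
    have hdiv : (2 ^ (n + 1) + i) / 2 = 2 ^ n + i / 2 := by rw [pow_succ]; omega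
    have hmod : (2 ^ (n + 1) + i) % 2 = i % 2 := by rw [pow_succ]; omega
    rw [fbits, hdiv, hmod, ih (i / 2) hlt]
    rw [show fbits (n + 1) i = fbits n (i / 2) ++ [((i % 2 : Nat) : Int)] from rfl]
    simp

theorem rows_eq : ∀ n : Nat,
    (List.range n).foldl
      (fun rs _ => rs.map (fun r => (0 : Int) :: r) ++ rs.map (fun r => (1 : Int) :: r)) [[]]
    = (List.range (2 ^ n)).map (fbits n) := by
  intro n
  induction n with
  | zero => simp [List.range_succ, fbits]
  | succ n ih =>
    rw [List.range_succ, List.foldl_append, ih]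
    simp only [List.foldl_cons, List.foldl_nil, List.map_map]
    rw [show 2 ^ (n + 1) = 2 ^ n + 2 ^ n by rw [pow_succ]; omega, List.range_add, List.map_append,
      List.map_map]
    congr 1
    · exact List.map_congr_left fun i hi => by
        rw [Function.comp_apply, ← fbits_low n i (List.mem_range.mp hi)]
    · exact List.map_congr_left fun i hi => by
        rw [Function.comp_apply, Function.comp_apply, ← fbits_high n i (List.mem_range.mp hi)]

theorem enum_map_range {α : Type} (f : Nat → α) : ∀ m : Nat,
    PySem.List.enumerate ((List.range m).map f) 0
      = (List.range m).map (fun k : Nat => ((k : Int), f k)) := by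
  intro m
  induction m with
  | zero => simp [PySem.List.enumerate]
  | succ m ih =>
    rw [List.range_succ, List.map_append, PySem.List.enumerate_append, ih]
    simp [PySem.List.enumerate]

-- the A-side element value equals fbits
theorem aval_eq (n : Nat) (hn : 1 ≤ n) (k : Nat) (hk : k < 2 ^ n) :
    (PySem.Chars.zfill (PySem.Int.toBinChars ((k : Nat) : Int)) ((n : Nat) : Int)).map pvDigitVal
      = fbits n k := by
  have htb : PySem.Int.toBinChars ((k : Nat) : Int) = binChars k := by
    rw [PySem.Int.toBinChars]
    simp [toDigits_two_eq]
  obtain ⟨c, rest, hc, hsign⟩ := binChars_head k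
  rw [htb, hc, zfill_no_sign c rest hsign, List.map_append, List.map_replicate]
  have h0 : pvDigitVal '0' = 0 := by decide
  rw [h0, show ((n : Nat) : Int).toNat = n from Int.toNat_natCast n, ← hc,
    pad_fbits n hn k hk]

theorem tables_eq (n : Nat) (hn : 1 ≤ n) :
    ((PySem.List.pyRange 0 ((2 : Int) ^ n) 1).foldl
      (fun d i => d.insert i ((PySem.Chars.zfill (PySem.Int.toBinChars i) ((n : Nat) : Int)).map pvDigitVal))
      PySem.Dict.empty).items
    = (PySem.Dict.ofList (PySem.List.enumerate
        ((List.range n).foldl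
          (fun rs _ => rs.map (fun r => (0 : Int) :: r) ++ rs.map (fun r => (1 : Int) :: r)) [[]])
        0)).items := by
  have hcast : ((2 : Int) ^ n) = (((2 ^ n : Nat) : Int)) := by push_cast; ring
  -- A side
  have hA : ((PySem.List.pyRange 0 ((2 : Int) ^ n) 1).foldl
      (fun d i => d.insert i ((PySem.Chars.zfill (PySem.Int.toBinChars i) ((n : Nat) : Int)).map pvDigitVal))
      PySem.Dict.empty).items
      = (List.range (2 ^ n)).map (fun k : Nat => ((k : Int), fbits n k)) := by
    rw [PySem.Dict.items_foldl_insert_fresh _ (fun i => i)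
      (fun i => (PySem.Chars.zfill (PySem.Int.toBinChars i) ((n : Nat) : Int)).map pvDigitVal)
      PySem.Dict.empty (fun a _ => PySem.Dict.contains_empty a)
      (by simpa [List.map_id] using PySem.List.nodup_pyRange_one 0 ((2 : Int) ^ n))]
    rw [hcast, PySem.List.pyRange_zero_nat, List.map_map]
    have hemp : (PySem.Dict.empty : PySem.Dict Int (List Int)).items = [] := rfl
    rw [hemp, List.nil_append]
    exact List.map_congr_left fun k hk => by
      simp only [Function.comp_apply]
      rw [aval_eq n hn k (List.mem_range.mp hk)]
  -- B side
  have hB : (PySem.Dict.ofList (PySem.List.enumerate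
        ((List.range n).foldl
          (fun rs _ => rs.map (fun r => (0 : Int) :: r) ++ rs.map (fun r => (1 : Int) :: r)) [[]])
        0)).items
      = (List.range (2 ^ n)).map (fun k : Nat => ((k : Int), fbits n k)) := by
    rw [rows_eq n, enum_map_range (fbits n) (2 ^ n)]
    rw [PySem.Dict.ofList, PySem.Dict.update]
    rw [PySem.Dict.items_foldl_insert_fresh _ Prod.fst Prod.snd PySem.Dict.empty
      (fun a _ => PySem.Dict.contains_empty a.1)
      (by
        rw [List.map_map]
        exact List.nodup_range.map (fun a b hab => by simpa using hab))]
    have hemp : (PySem.Dict.empty : PySem.Dict Int (List Int)).items = [] := rfl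
    simp [hemp, Function.comp]
  rw [hA, hB]

-- ===== VERDICT (by name: the statement is the Claim_ definition above) =====
theorem convert_number_binary_spec : Claim_equal_convert_number_binary := by
  intro mntrms _
  unfold Spec_convert_number_binary
  simp only [convert_number_binary, convert_number_binary_alt]
  set mx : Int := (match PySem.List.max? mntrms (fun x => x) with | some m => m | none => 0) with hmx
  set n : Nat := (if 0 < mx then PySem.Int.bitLength mx else 1) with hn
  have h1 : 1 ≤ n := by
    rw [hn]
    split
    · rename_i h
      by_contra hc
      push_neg at hc
      have h0 : PySem.Int.bitLength mx = 0 := by omega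
      have := PySem.Int.lt_two_pow_bitLength mx
      rw [h0] at this
      simp at this
      omega
    · omega
  exact tables_eq n h1
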